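-- pv_equiv track=rewrite | github.com/nidyaedus/LeetCode-Python | Arrays/Easy/0026_Remove_Duplicates_from_Sorted_Array.py | removeDuplicates
-- ===== SOURCE A (Python) =====
-- from typing import List
--
-- def removeDuplicates(nums: List[int]) -> int:
--     if not nums:
--         return 0
--
--     yazici = 1
--
--     for okuyucu in range(1, len(nums)):
--         if nums[okuyucu] != nums[okuyucu -1]:
--             nums[yazici] = nums[okuyucu]
--
--             yazici += 1
--     return yazici
-- ===== SOURCE B (Python) =====
-- from typing import List
--
-- def removeDuplicates(nums: List[int]) -> int:
--     if not nums:
--         return 0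
--     kept = [nums[0]] + [b for a, b in zip(nums, nums[1:]) if b != a]
--     for j in range(len(kept)):
--         nums[j] = kept[j]
--     return len(kept)
-- ===== Notes on version B (the rewrite author's own statement) =====
-- stated objective: alternative
-- what changed: Replaces the in-place writer-pointer loop that compares against the possibly already-overwritten array with a two-pass decomposition: first collect surviving elements by a zip-comprehension over adjacent pairs of the ORIGINAL list, then copy them back and return the collected length.
import Mathlib
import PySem

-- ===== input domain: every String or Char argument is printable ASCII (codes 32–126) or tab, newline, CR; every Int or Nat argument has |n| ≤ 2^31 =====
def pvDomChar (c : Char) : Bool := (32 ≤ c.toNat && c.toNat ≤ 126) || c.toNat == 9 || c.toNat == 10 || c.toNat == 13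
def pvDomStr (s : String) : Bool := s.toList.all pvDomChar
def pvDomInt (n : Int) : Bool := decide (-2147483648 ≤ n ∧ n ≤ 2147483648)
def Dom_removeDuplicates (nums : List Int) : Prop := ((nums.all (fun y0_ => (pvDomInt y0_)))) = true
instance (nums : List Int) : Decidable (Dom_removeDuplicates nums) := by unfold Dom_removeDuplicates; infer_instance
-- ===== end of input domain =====

-- B replaces A's in-place writer-pointer loop by a two-pass decomposition (collect survivors
-- from adjacent pairs of the original list, then copy back); both Pythons mutate `nums` in place
-- (with the same observable effect); the equivalence proved here is about the RETURN value.

-- ===== PORT A =====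
-- loop body: indices okuyucu (1 ≤ okuyucu < len) and yazici (1 ≤ yazici ≤ okuyucu) are always in
-- range, so pyGetD/pySetD are exact here.
def pvStepA (st : List Int × Int) (okuyucu : Int) : List Int × Int :=
  if PySem.List.pyGetD st.1 okuyucu 0 ≠ PySem.List.pyGetD st.1 (okuyucu - 1) 0 then
    (PySem.List.pySetD st.1 st.2 (PySem.List.pyGetD st.1 okuyucu 0), st.2 + 1)
  else st

def removeDuplicates (nums : List Int) : Int :=
  if nums = [] then 0
  else ((PySem.List.pyRange 1 (nums.length : Int) 1).foldl pvStepA (nums, 1)).2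

-- ===== PORT B =====
-- the copy-back loop of Source B mutates nums and does not affect the return value; the return is len(kept).
def removeDuplicates_alt (nums : List Int) : Int :=
  match nums with
  | [] => 0
  | h :: t =>
    let kept := h :: (((nums.zip t).filter (fun p => p.2 != p.1)).map Prod.snd)
    (kept.length : Int)

-- ===== PRECONDITION & SPEC =====
def Spec_removeDuplicates (nums : List Int) (out : Int) : Prop := out = removeDuplicates_alt nums
instance (nums : List Int) (out : Int) : Decidable (Spec_removeDuplicates nums out) := by unfold Spec_removeDuplicates; infer_instance

-- ===== CLAIM (what is proved, stated in full; the proofs are below) =====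
def Claim_equal_removeDuplicates : Prop := ∀ (nums : List Int), Dom_removeDuplicates nums → Spec_removeDuplicates nums (removeDuplicates nums)

-- ===== LEMMAS AND PROOFS =====

theorem pvGetD_set (l : List Int) (n j : Nat) (v : Int) :
    (l.set n v).getD j 0 = if j = n ∧ n < l.length then v else l.getD j 0 := by
  simp [List.getD, List.getElem?_set]
  split_ifs <;> simp_all

-- A's loop, over indices s, s+1, …, s+c-1 = len-1: as long as the state list agrees with the
-- original `nums` on all indices ≥ s-1 and the writer stays ≤ s, the final writer value is
-- y plus the number of unequal adjacent pairs of the ORIGINAL list from position s on.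
theorem pvLoopA (nums : List Int) :
    ∀ (c s : Nat) (l : List Int) (y : Int),
      l.length = nums.length → 1 ≤ s → s + c = nums.length →
      (∀ j : Nat, s - 1 ≤ j → l.getD j 0 = nums.getD j 0) →
      1 ≤ y → y.toNat ≤ s →
      (((List.range' s c).map (Nat.cast : Nat → Int)).foldl pvStepA (l, y)).2
        = y + ((((nums.drop (s-1)).zip (nums.drop s)).filter (fun p => p.2 != p.1)).length : Int) := by
  intro c
  induction c with
  | zero =>
    intro s l y hlen hs hsc hagree hy1 hys
    have hdrop : nums.drop s = [] := List.drop_eq_nil_of_le (by omega)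
    simp [hdrop]
  | succ c ih =>
    intro s l y hlen hs hsc hagree hy1 hys
    have hslt : s < nums.length := by omega
    have hs1lt : s - 1 < nums.length := by omega
    -- head of the index list
    rw [List.range'_succ, List.map_cons, List.foldl_cons]
    -- evaluate the step at index s
    have hcast : ((s : Int) - 1) = ((s - 1 : Nat) : Int) := by omega
    have hget_s : PySem.List.pyGetD l (s : Int) 0 = nums.getD s 0 := by
      rw [PySem.List.pyGetD_natCast]; exact hagree s (by omega)
    have hget_s1 : PySem.List.pyGetD l ((s : Int) - 1) 0 = nums.getD (s-1) 0 := by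
      rw [hcast, PySem.List.pyGetD_natCast]; exact hagree (s-1) (by omega)
    -- unfold the pairs on the right-hand side
    have hdrop1 : nums.drop (s-1) = nums[s-1] :: nums.drop s := by
      have := List.drop_eq_getElem_cons hs1lt
      rwa [show s - 1 + 1 = s by omega] at this
    have hdrop2 : nums.drop s = nums[s] :: nums.drop (s+1) := List.drop_eq_getElem_cons hslt
    have hgd_s : nums.getD s 0 = nums[s] := List.getD_eq_getElem nums 0 hslt
    have hgd_s1 : nums.getD (s-1) 0 = nums[s-1] := List.getD_eq_getElem nums 0 hs1lt
    by_cases hne : nums.getD s 0 = nums.getD (s-1) 0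
    · -- equal adjacent pair: no write, pair filtered out
      have heq : nums[s] = nums[s-1] := by rw [← hgd_s, ← hgd_s1]; exact hne
      have hstep : pvStepA (l, y) (s : Int) = (l, y) := by
        unfold pvStepA
        rw [hget_s, hget_s1]
        rw [if_neg (fun h => h hne)]
      rw [hstep]
      rw [ih (s+1) l y hlen (by omega) (by omega) (fun j hj => hagree j (by omega)) hy1 (by omega)]
      rw [show s + 1 - 1 = s from rfl, hdrop1, hdrop2]
      simp [List.zip_cons_cons, heq]
    · -- unequal pair: write nums[s] at the writer position, writer advances, pair kept
      have hneq : nums[s] ≠ nums[s-1] := by rw [← hgd_s, ← hgd_s1]; exact hne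
      have hstep : pvStepA (l, y) (s : Int) =
          (l.set y.toNat (nums.getD s 0), y + 1) := by
        unfold pvStepA
        rw [hget_s, hget_s1]
        rw [if_pos hne]
        rw [PySem.List.pySetD_of_nonneg l _ (by omega)]
      rw [hstep]
      -- the write is at index y.toNat ≤ s, and if it hits index s it writes nums[s] itself
      have hagree' : ∀ j : Nat, (s+1) - 1 ≤ j →
          (l.set y.toNat (nums.getD s 0)).getD j 0 = nums.getD j 0 := by
        intro j hj
        rw [pvGetD_set]
        split_ifs with hcase
        · have hjs : j = s := by omega
          rw [hjs]
        · exact hagree j (by omega)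
      rw [ih (s+1) (l.set y.toNat (nums.getD s 0)) (y+1)
        (by simp [hlen]) (by omega) (by omega) hagree' (by omega) (by omega)]
      rw [show s + 1 - 1 = s from rfl, hdrop1, hdrop2]
      simp only [List.zip_cons_cons, List.filter_cons]
      rw [if_pos (by simpa using hneq)]
      simp only [List.length_cons]
      push_cast
      ring

theorem removeDuplicates_spec' (nums : List Int) :
    removeDuplicates nums = removeDuplicates_alt nums := by
  match nums with
  | [] => rfl
  | h :: t =>
    unfold removeDuplicates removeDuplicates_alt
    rw [if_neg (by simp)]
    have hr : PySem.List.pyRange 1 (((h :: t).length : Nat) : Int) 1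
        = (List.range' 1 t.length).map (Nat.cast : Nat → Int) := by
      rw [PySem.List.pyRange_one, List.range'_eq_map_range, List.map_map]
      have : ((((h :: t).length : Nat) : Int) - 1).toNat = t.length := by
        simp
      rw [this]
      apply List.map_congr_left
      intro k _
      simp [Function.comp]
    rw [hr]
    have := pvLoopA (h :: t) t.length 1 (h :: t) 1 rfl le_rfl
      (by simp only [List.length_cons]; omega) (fun j _ => rfl) le_rfl (by simp)
    rw [this]
    simp
    omega

-- ===== VERDICT (by name: the statement is the Claim_ definition above) =====
theorem removeDuplicates_spec : Claim_equal_removeDuplicates := by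
  intro nums _
  exact removeDuplicates_spec' nums
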